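-- pv_equiv track=rewrite | github.com/Gu-wop/T-414-AFLV | set_02/gpt.py | shortest_pattern_len
-- ===== SOURCE A (Python) =====
-- def shortest_pattern_len(s: str) -> int:
--     n = len(s)
--     lps = [0] * n
--     k = 0
--     for i in range(1, n):
--         while k > 0 and s[i] != s[k]:
--             k = lps[k - 1]
--         if s[i] == s[k]:
--             k += 1
--         lps[i] = k
--     return n - lps[-1]
-- ===== SOURCE B (Python) =====
-- def shortest_pattern_len(s: str) -> int:
--     n = len(s)
--     for p in range(1, n):
--         if all(s[i] == s[i - p] for i in range(p, n)):
--             return p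
--     return n
-- ===== Notes on version B (the rewrite author's own statement) =====
-- stated objective: simpler
-- what changed: Replaces the KMP failure-function construction (inner while-loop over an lps table) with a direct first-match scan: return the smallest shift p such that s[i] == s[i-p] for all i in [p, n), else n.
import Mathlib
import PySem

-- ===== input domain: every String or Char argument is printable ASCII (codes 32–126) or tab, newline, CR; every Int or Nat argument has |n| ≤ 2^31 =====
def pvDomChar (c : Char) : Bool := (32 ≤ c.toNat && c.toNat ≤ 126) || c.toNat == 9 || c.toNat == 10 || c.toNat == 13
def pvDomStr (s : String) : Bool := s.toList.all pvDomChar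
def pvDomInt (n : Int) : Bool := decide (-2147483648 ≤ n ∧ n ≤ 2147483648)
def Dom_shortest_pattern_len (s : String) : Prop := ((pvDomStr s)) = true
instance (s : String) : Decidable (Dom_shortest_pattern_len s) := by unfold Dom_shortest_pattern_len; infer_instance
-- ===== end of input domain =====

-- B replaces the KMP failure-function table with a direct first-match scan for the
-- smallest shift p with s[p:] == s[:n-p] (objective: simpler).

-- ===== PORT A =====
-- inner `while k > 0 and s[i] != s[k]: k = lps[k-1]`; the fuel argument (initialised to k)
-- is only a totality guard: k strictly decreases each iteration, so fuel never runs out.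
def kmpWhile (l : List Char) (lps : List Nat) (c : Char) : Nat → Nat → Nat
  | 0, k => k
  | fuel + 1, k =>
    if 0 < k then
      if c ≠ l.getD k ' ' then kmpWhile l lps c fuel (lps.getD (k - 1) 0)
      else k
    else k

-- one iteration of `for i in range(1, n)`; lps is built by appending (each lps[i] is
-- assigned in index order in Python, and entries beyond i are never read before being set)
def kmpStep (l : List Char) : List Nat × Nat → Nat → List Nat × Nat
  | (lps, k), i =>
    let c := l.getD i ' '
    let k1 := kmpWhile l lps c k k
    let k2 := if c = l.getD k1 ' ' then k1 + 1 else k1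
    (lps ++ [k2], k2)

def shortest_pattern_len (s : String) : Int :=
  let l := s.toList
  let n := l.length
  if n = 0 then 0  -- Python raises IndexError here (lps[-1] on the empty list); excluded by Pre_
  else
    let st := (List.range' 1 (n - 1)).foldl (kmpStep l) ([0], 0)
    (n : Int) - (st.1.getLastD 0 : Nat)

-- ===== PORT B =====
-- `for p in range(1, n): if all(s[i] == s[i-p] for i in range(p, n)): return p` / `return n`
-- (indices i and i-p are always in range, so l.getD is exact for Python's s[i])
def shortest_pattern_len_alt (s : String) : Int :=
  let l := s.toList
  let n := l.length
  match (List.range' 1 (n - 1)).find?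
      (fun p => (List.range' p (n - p)).all (fun i => l.getD i ' ' == l.getD (i - p) ' ')) with
  | some p => (p : Int)
  | none => (n : Int)

-- ===== PRECONDITION & SPEC =====
-- Pre_ excludes only the empty string, on which Python A raises IndexError (lps[-1] on []).
def Pre_shortest_pattern_len (s : String) : Prop := s ≠ ""
instance (s : String) : Decidable (Pre_shortest_pattern_len s) := by
  unfold Pre_shortest_pattern_len; infer_instance
def pvWitness_shortest_pattern_len : String := "abcab"

def Spec_shortest_pattern_len (s : String) (out : Int) : Prop := out = shortest_pattern_len_alt s
instance (s : String) (out : Int) : Decidable (Spec_shortest_pattern_len s out) := by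
  unfold Spec_shortest_pattern_len; infer_instance

-- ===== CLAIM (what is proved, stated in full; the proofs are below) =====
def Claim_equal_shortest_pattern_len : Prop := ∀ (s : String), Dom_shortest_pattern_len s → Pre_shortest_pattern_len s → Spec_shortest_pattern_len s (shortest_pattern_len s)

-- ===== LEMMAS AND PROOFS =====

-- `Brd t k`: t has a (proper) border of length k — the length-k prefix equals the length-k suffix.
def Brd (t : List Char) (k : Nat) : Prop := k < t.length ∧ t.take k = t.drop (t.length - k)

-- length of the longest proper border
def maxB (t : List Char) : Nat :=
  Nat.findGreatest (fun k => t.take k = t.drop (t.length - k)) (t.length - 1)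

theorem maxB_brd (t : List Char) (h : t ≠ []) : Brd t (maxB t) := by
  have hs := Nat.findGreatest_spec (P := fun k => t.take k = t.drop (t.length - k))
    (n := t.length - 1) (Nat.zero_le _) (by simp)
  have hle : maxB t ≤ t.length - 1 := Nat.findGreatest_le _
  have hpos : 0 < t.length := List.length_pos_of_ne_nil h
  exact ⟨by omega, hs⟩

theorem brd_le_maxB (t : List Char) (k : Nat) (h : Brd t k) : k ≤ maxB t := by
  obtain ⟨h1, h2⟩ := h
  exact Nat.le_findGreatest (by omega) h2

theorem brd_down (t : List Char) (j k : Nat) (hjk : j < k) (hk : Brd t k) (hj : Brd t j) :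
    Brd (t.take k) j := by
  obtain ⟨hkn, hke⟩ := hk
  obtain ⟨hjn, hje⟩ := hj
  have hlen : (t.take k).length = k := by simp; omega
  refine ⟨by omega, ?_⟩
  rw [hlen, List.take_take, Nat.min_eq_left (by omega), hke, List.drop_drop]
  rw [show t.length - k + (k - j) = t.length - j by omega]
  exact hje

theorem brd_trans (t : List Char) (j k : Nat) (hjk : j < k) (hk : Brd t k)
    (hj : Brd (t.take k) j) : Brd t j := by
  obtain ⟨hkn, hke⟩ := hk
  obtain ⟨hjn, hje⟩ := hj
  have hlen : (t.take k).length = k := by simp; omega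
  refine ⟨by omega, ?_⟩
  rw [hlen] at hje
  rw [List.take_take, Nat.min_eq_left (by omega), hke, List.drop_drop] at hje
  rw [show t.length - k + (k - j) = t.length - j by omega] at hje
  exact hje

theorem getD_take (l : List Char) (i k : Nat) (h : k < i) :
    (l.take i).getD k ' ' = l.getD k ' ' := by
  simp [List.getD_eq_getElem?_getD, h]

theorem brd_concat (t : List Char) (c : Char) (k : Nat) (hk : k < t.length) :
    Brd (t ++ [c]) (k + 1) ↔ (Brd t k ∧ t.getD k ' ' = c) := by
  have e1 : (t ++ [c]).take (k + 1) = t.take (k + 1) :=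
    List.take_append_of_le_length (by omega)
  have e2 : (t ++ [c]).drop ((t ++ [c]).length - (k + 1)) = t.drop (t.length - k) ++ [c] := by
    rw [show (t ++ [c]).length - (k + 1) = t.length - k by simp]
    exact List.drop_append_of_le_length (by omega)
  have e3 : t.take (k + 1) = t.take k ++ [t.getD k ' '] := by
    have hg : t[k]? = some t[k] := List.getElem?_eq_getElem hk
    rw [List.take_succ, hg]
    simp [List.getD_eq_getElem?_getD, hg]
  constructor
  · rintro ⟨h1, h2⟩
    rw [e1, e2, e3] at h2
    have hlens : (t.take k).length = (t.drop (t.length - k)).length := by simp; omega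
    obtain ⟨h4, h5⟩ := List.append_inj h2 (by simpa using hlens)
    refine ⟨⟨hk, h4⟩, by simpa using h5⟩
  · rintro ⟨⟨-, h2⟩, h3⟩
    refine ⟨by simp; omega, ?_⟩
    rw [e1, e2, e3, h2, h3]

theorem kmpWhile_spec (l : List Char) (i : Nat) (hi1 : 1 ≤ i) (hi : i < l.length)
    (lps : List Nat) (c : Char)
    (hlps : ∀ j, j < i → lps.getD j 0 = maxB (l.take (j + 1))) :
    ∀ fuel k, k ≤ fuel → Brd (l.take i) k →
      (∀ j, Brd (l.take i) j → l.getD j ' ' = c → j ≤ k) →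
      Brd (l.take i) (kmpWhile l lps c fuel k) ∧
      (kmpWhile l lps c fuel k = 0 ∨ l.getD (kmpWhile l lps c fuel k) ' ' = c) ∧
      (∀ j, Brd (l.take i) j → l.getD j ' ' = c → j ≤ kmpWhile l lps c fuel k) := by
  intro fuel
  induction fuel with
  | zero =>
    intro k hk hb hinv
    have hk0 : k = 0 := by omega
    subst hk0
    exact ⟨hb, Or.inl rfl, hinv⟩
  | succ f ih =>
    intro k hk hb hinv
    by_cases hk0 : 0 < k
    · by_cases hc : c ≠ l.getD k ' '
      · rw [show kmpWhile l lps c (f + 1) k = kmpWhile l lps c f (lps.getD (k - 1) 0) from by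
          simp only [kmpWhile]; rw [if_pos hk0, if_pos hc]]
        have hklen : (l.take i).length = i := by simp; omega
        have hki : k < i := by have := hb.1; omega
        have hlpsk : lps.getD (k - 1) 0 = maxB (l.take k) := by
          rw [hlps (k - 1) (by omega), show k - 1 + 1 = k by omega]
        have htt : (l.take i).take k = l.take k := by
          rw [List.take_take]; congr 1; omega
        have hne : l.take k ≠ [] := by
          apply List.ne_nil_of_length_pos; simp; omega
        have hmb := maxB_brd (l.take k) hne
        have hk'lt : maxB (l.take k) < k := by
          have h1 := hmb.1
          have h2 : (l.take k).length = k := by simp; omega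
          omega
        have hbk' : Brd (l.take i) (maxB (l.take k)) :=
          brd_trans _ _ k hk'lt hb (by rw [htt]; exact hmb)
        have hinv' : ∀ j, Brd (l.take i) j → l.getD j ' ' = c → j ≤ maxB (l.take k) := by
          intro j hj hcj
          have hjk : j ≤ k := hinv j hj hcj
          have hjne : j ≠ k := by intro h; subst h; exact hc hcj.symm
          have hdj : Brd ((l.take i).take k) j := brd_down _ j k (by omega) hb hj
          rw [htt] at hdj
          exact brd_le_maxB _ j hdj
        rw [hlpsk]
        exact ih (maxB (l.take k)) (by omega) hbk' hinv'
      · rw [show kmpWhile l lps c (f + 1) k = k from by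
          simp only [kmpWhile]; rw [if_pos hk0, if_neg hc]]
        have hc' : c = l.getD k ' ' := not_not.1 hc
        exact ⟨hb, Or.inr hc'.symm, hinv⟩
    · have hk0' : k = 0 := by omega
      subst hk0'
      rw [show kmpWhile l lps c (f + 1) 0 = 0 from by
        simp only [kmpWhile]; rw [if_neg (Nat.lt_irrefl 0)]]
      exact ⟨hb, Or.inl rfl, hinv⟩

theorem kmpStep_spec (l : List Char) (i : Nat) (hi1 : 1 ≤ i) (hi : i < l.length)
    (lps : List Nat)
    (hlps : ∀ j, j < i → lps.getD j 0 = maxB (l.take (j + 1))) :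
    kmpStep l (lps, maxB (l.take i)) i =
      (lps ++ [maxB (l.take (i + 1))], maxB (l.take (i + 1))) := by
  have hne : l.take i ≠ [] := by apply List.ne_nil_of_length_pos; simp; omega
  have hlen : (l.take i).length = i := by simp; omega
  have hb0 := maxB_brd (l.take i) hne
  have hinv0 : ∀ j, Brd (l.take i) j → l.getD j ' ' = l.getD i ' ' → j ≤ maxB (l.take i) :=
    fun j hj _ => brd_le_maxB _ j hj
  obtain ⟨ha, hbex, hcinv⟩ := kmpWhile_spec l i hi1 hi lps (l.getD i ' ') hlps
    (maxB (l.take i)) (maxB (l.take i)) le_rfl hb0 hinv0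
  set r := kmpWhile l lps (l.getD i ' ') (maxB (l.take i)) (maxB (l.take i)) with hr
  have hsplit : l.take (i + 1) = l.take i ++ [l.getD i ' '] := by
    have hg : l[i]? = some l[i] := List.getElem?_eq_getElem hi
    rw [List.take_succ, hg]
    simp [List.getD_eq_getElem?_getD, hg]
  have hrt : r < (l.take i).length := ha.1
  have hgr : (l.take i).getD r ' ' = l.getD r ' ' := getD_take l i r (by omega)
  have hkey : (if l.getD i ' ' = l.getD r ' ' then r + 1 else r) = maxB (l.take (i + 1)) := by
    by_cases hcc : l.getD i ' ' = l.getD r ' '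
    · rw [if_pos hcc]
      rw [hsplit]
      have hb1 : Brd (l.take i ++ [l.getD i ' ']) (r + 1) :=
        (brd_concat _ _ r hrt).2 ⟨ha, by rw [hgr, ← hcc]⟩
      have hge : r + 1 ≤ maxB (l.take i ++ [l.getD i ' ']) := brd_le_maxB _ _ hb1
      have hmbb := maxB_brd (l.take i ++ [l.getD i ' ']) (by simp)
      have hle : maxB (l.take i ++ [l.getD i ' ']) ≤ r + 1 := by
        obtain ⟨m, hm⟩ : ∃ m, maxB (l.take i ++ [l.getD i ' ']) = m + 1 :=
          ⟨maxB (l.take i ++ [l.getD i ' ']) - 1, by omega⟩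
        rw [hm] at hmbb ⊢
        have hmlt : m < (l.take i).length := by
          have := hmbb.1; simp at this ⊢; omega
        obtain ⟨hbm, hgm⟩ := (brd_concat _ _ m hmlt).1 hmbb
        have hlm : l.getD m ' ' = l.getD i ' ' :=
          (getD_take l i m (by omega)).symm.trans hgm
        have := hcinv m hbm hlm
        omega
      omega
    · rw [if_neg hcc]
      have hr0 : r = 0 := by
        rcases hbex with h | h
        · exact h
        · exact absurd h.symm hcc
      rw [hr0] at hcc hgr hcinv ⊢
      rw [hsplit]
      by_contra hne0
      have hmbb := maxB_brd (l.take i ++ [l.getD i ' ']) (by simp)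
      obtain ⟨m, hm⟩ : ∃ m, maxB (l.take i ++ [l.getD i ' ']) = m + 1 :=
        ⟨maxB (l.take i ++ [l.getD i ' ']) - 1, by omega⟩
      rw [hm] at hmbb
      have hmlt : m < (l.take i).length := by
        have := hmbb.1; simp at this ⊢; omega
      obtain ⟨hbm, hgm⟩ := (brd_concat _ _ m hmlt).1 hmbb
      have hlm : l.getD m ' ' = l.getD i ' ' :=
        (getD_take l i m (by omega)).symm.trans hgm
      have hm0 : m = 0 := by have := hcinv m hbm hlm; omega
      subst hm0
      exact hcc hlm.symm
  simp only [kmpStep]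
  rw [← hr, hkey]

theorem getD_map_range (f : Nat → Nat) (n j : Nat) (h : j < n) :
    ((List.range n).map f).getD j 0 = f j := by
  simp [List.getD_eq_getElem?_getD, h]

theorem kmp_fold (l : List Char) (hn : 1 ≤ l.length) :
    ∀ m, m ≤ l.length - 1 →
      (List.range' 1 m).foldl (kmpStep l) ([0], 0) =
        ((List.range (m + 1)).map (fun j => maxB (l.take (j + 1))), maxB (l.take (m + 1))) := by
  intro m
  induction m with
  | zero =>
    intro _
    have h1 : maxB (l.take 1) = 0 := by
      unfold maxB
      rw [show (l.take 1).length = 1 by simp; omega]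
      simp
    simp [h1]
  | succ m ih =>
    intro hm
    rw [show List.range' 1 (m + 1) = List.range' 1 m ++ [1 + m] from by
      simpa using List.range'_concat (s := 1) (n := m) (step := 1)]
    rw [List.foldl_append, ih (by omega)]
    simp only [List.foldl_cons, List.foldl_nil]
    rw [show 1 + m = m + 1 by omega]
    rw [kmpStep_spec l (m + 1) (by omega) (by omega) _
      (fun j hj => getD_map_range _ (m + 1) j hj)]
    rw [show List.range (m + 1 + 1) = List.range (m + 1) ++ [m + 1] from List.range_succ]
    simp

theorem A_eq (s : String) (h : s.toList ≠ []) :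
    shortest_pattern_len s = (s.toList.length : Int) - (maxB s.toList : Int) := by
  have hn : 1 ≤ s.toList.length := List.length_pos_of_ne_nil h
  simp only [shortest_pattern_len]
  rw [if_neg (by omega)]
  rw [kmp_fold s.toList hn (s.toList.length - 1) le_rfl]
  have hll : s.toList.length - 1 + 1 = s.toList.length := by omega
  rw [hll]
  have hlast : ((List.range s.toList.length).map
      fun j => maxB (s.toList.take (j + 1))).getLastD 0 = maxB s.toList := by
    conv_lhs => rw [show s.toList.length = (s.toList.length - 1) + 1 by omega,
      List.range_succ, List.map_append]
    simp only [List.map_cons, List.map_nil]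
    rw [List.getLastD_concat, hll, List.take_length]
  rw [List.take_length, hlast]

theorem find?_range'_some (f : Nat → Bool) (a m p : Nat)
    (h : (List.range' a m).find? f = some p) :
    f p = true ∧ a ≤ p ∧ p < a + m ∧ ∀ q, a ≤ q → q < p → f q = false := by
  induction m generalizing a with
  | zero => simp [List.range'] at h
  | succ m ih =>
    rw [List.range'_succ] at h
    by_cases hfa : f a = true
    · rw [List.find?_cons_of_pos hfa] at h
      obtain rfl : a = p := by injection h
      exact ⟨hfa, le_rfl, by omega, fun q hq1 hq2 => absurd hq1 (by omega)⟩
    · rw [List.find?_cons_of_neg (by simpa using hfa)] at h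
      obtain ⟨h1, h2, h3, h4⟩ := ih (a + 1) h
      refine ⟨h1, by omega, by omega, fun q hq1 hq2 => ?_⟩
      by_cases hqa : q = a
      · subst hqa; simpa using hfa
      · exact h4 q (by omega) hq2

theorem find?_range'_none (f : Nat → Bool) (a m : Nat)
    (h : (List.range' a m).find? f = none) :
    ∀ q, a ≤ q → q < a + m → f q = false := by
  intro q hq1 hq2
  have := List.find?_eq_none.1 h q (List.mem_range'_1.2 ⟨hq1, hq2⟩)
  simpa using this

theorem all_shift_iff (l : List Char) (p : Nat) (h1 : 1 ≤ p) (h2 : p ≤ l.length - 1) :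
    ((List.range' p (l.length - p)).all
        (fun i => l.getD i ' ' == l.getD (i - p) ' ')) = true ↔
      l.take (l.length - p) = l.drop p := by
  have hn : p < l.length := by omega
  rw [List.all_eq_true]
  constructor
  · intro hall
    apply List.ext_getElem?
    intro j
    rw [List.getElem?_take, List.getElem?_drop]
    by_cases hj : j < l.length - p
    · rw [if_pos hj]
      have hb := hall (p + j) (List.mem_range'_1.2 ⟨by omega, by omega⟩)
      rw [beq_iff_eq, show p + j - p = j by omega] at hb
      have e1 : l[p + j]? = some (l[p + j]'(by omega)) := List.getElem?_eq_getElem (by omega)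
      have e2 : l[j]? = some (l[j]'(by omega)) := List.getElem?_eq_getElem (by omega)
      rw [e1, e2]
      simp only [List.getD_eq_getElem?_getD, e1, e2, Option.getD_some] at hb
      simp [hb]
    · rw [if_neg hj, List.getElem?_eq_none (show l.length ≤ p + j by omega)]
  · intro he i hi
    rw [List.mem_range'_1] at hi
    obtain ⟨hi1, hi2⟩ := hi
    have hj : i - p < l.length - p := by omega
    have hc := congrArg (fun t => t[i - p]?) he
    simp only [List.getElem?_take, List.getElem?_drop] at hc
    rw [if_pos hj, show p + (i - p) = i by omega] at hc
    rw [beq_iff_eq, show i - p = i - p from rfl]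
    simp only [List.getD_eq_getElem?_getD, ← hc]

theorem B_eq (s : String) (h : s.toList ≠ []) :
    shortest_pattern_len_alt s = (s.toList.length : Int) - (maxB s.toList : Int) := by
  have hn1 : 1 ≤ s.toList.length := List.length_pos_of_ne_nil h
  simp only [shortest_pattern_len_alt]
  have hpred : ∀ p, 1 ≤ p → p ≤ s.toList.length - 1 →
      (((List.range' p (s.toList.length - p)).all
          (fun i => s.toList.getD i ' ' == s.toList.getD (i - p) ' ')) = true ↔
        Brd s.toList (s.toList.length - p)) := by
    intro p h1 h2
    rw [all_shift_iff s.toList p h1 h2]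
    unfold Brd
    constructor
    · intro he
      refine ⟨by omega, ?_⟩
      rw [show s.toList.length - (s.toList.length - p) = p by omega]
      exact he
    · rintro ⟨h3, h4⟩
      rw [show s.toList.length - (s.toList.length - p) = p by omega] at h4
      exact h4
  cases hf : (List.range' 1 (s.toList.length - 1)).find?
      (fun p => (List.range' p (s.toList.length - p)).all
        (fun i => s.toList.getD i ' ' == s.toList.getD (i - p) ' ')) with
  | some p =>
    obtain ⟨h1, h2, h3, h4⟩ := find?_range'_some _ 1 (s.toList.length - 1) p hf
    have hbp : Brd s.toList (s.toList.length - p) := (hpred p h2 (by omega)).1 h1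
    have hle : s.toList.length - p ≤ maxB s.toList := brd_le_maxB _ _ hbp
    have hmb := maxB_brd s.toList h
    have hmlt : maxB s.toList < s.toList.length := hmb.1
    have heq : maxB s.toList = s.toList.length - p := by
      by_contra hne'
      have hq1 : 1 ≤ s.toList.length - maxB s.toList := by omega
      have hq2 : s.toList.length - maxB s.toList < p := by omega
      have hfq := h4 (s.toList.length - maxB s.toList) hq1 hq2
      have hbb : Brd s.toList (s.toList.length - (s.toList.length - maxB s.toList)) := by
        rw [show s.toList.length - (s.toList.length - maxB s.toList) = maxB s.toList by omega]
        exact hmb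
      have := (hpred _ hq1 (by omega)).2 hbb
      rw [hfq] at this
      exact Bool.noConfusion this
    rw [heq]
    have : p ≤ s.toList.length := by omega
    push_cast
    omega
  | none =>
    have h4 := find?_range'_none _ 1 (s.toList.length - 1) hf
    have hmz : maxB s.toList = 0 := by
      by_contra h0
      have hmb := maxB_brd s.toList h
      have hmlt : maxB s.toList < s.toList.length := hmb.1
      have hpos : 0 < maxB s.toList := Nat.pos_of_ne_zero h0
      have hq1 : 1 ≤ s.toList.length - maxB s.toList := by omega
      have hq2 : s.toList.length - maxB s.toList < 1 + (s.toList.length - 1) := by omega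
      have hfq := h4 (s.toList.length - maxB s.toList) hq1 hq2
      have hbb : Brd s.toList (s.toList.length - (s.toList.length - maxB s.toList)) := by
        rw [show s.toList.length - (s.toList.length - maxB s.toList) = maxB s.toList by omega]
        exact hmb
      have := (hpred _ hq1 (by omega)).2 hbb
      rw [hfq] at this
      exact Bool.noConfusion this
    rw [hmz]
    simp

-- ===== VERDICT (by name: the statement is the Claim_ definition above) =====
theorem shortest_pattern_len_spec : Claim_equal_shortest_pattern_len := by
  intro s _ hpre
  unfold Spec_shortest_pattern_len
  have hnil : s.toList ≠ [] := by
    intro hcontra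
    exact hpre (String.ext (by simpa [String.toList] using hcontra))
  rw [A_eq s hnil, B_eq s hnil]
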